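-- pv_equiv track=rewrite | github.com/iair/coding_challenges | performance/utils.py | identify_keywords_and_positions
-- ===== SOURCE A (Python) =====
-- from typing import List, Any, Optional
--
-- def identify_keywords_and_positions(
--     product_list: List[str],
--     keywords: List[str]
-- ) -> tuple[List[str], List[int]]:
--     """
--     Returns identified keywords and their positions in the list.
--
--     Parameters:
--     - product_list: list of product descriptions
--     - keywords: list of keywords to look for
--
--     Returns:
--     - A tuple containing two lists: the first list contains the found keywords, and the second list contains their positions in the input list
--     """
--     keyword_positions = {
--         keyword: [idx for idx, item in enumerate(product_list) if keyword in item.lower()]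
--         for keyword in keywords
--         if any(keyword in item.lower() for item in product_list)
--     }
--     # Extract the found keywords and their positions
--     found_keywords = list(keyword_positions.keys())
--     found_positions = [pos for positions in keyword_positions.values() for pos in positions]
--     return found_keywords, found_positions
-- ===== SOURCE B (Python) =====
-- def identify_keywords_and_positions(product_list, keywords):
--     # Flat event list instead of a dict: one pass over the products collects
--     # (keyword-rank, product-index) match events; sorting the events groups them
--     # by keyword rank, and a single grouping scan emits both output lists.
--     uniq = []
--     for k in keywords:
--         if k not in uniq:
--             uniq.append(k)
--     events = []
--     for j, item in enumerate(product_list):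
--         text = item.lower()
--         for i, k in enumerate(uniq):
--             if k in text:
--                 events.append((i, j))
--     events.sort()
--     found_keywords = []
--     found_positions = []
--     for i, j in events:
--         k = uniq[i]
--         if not found_keywords or found_keywords[-1] != k:
--             found_keywords.append(k)
--         found_positions.append(j)
--     return found_keywords, found_positions
-- ===== Notes on version B (the rewrite author's own statement) =====
-- stated objective: alternative
-- what changed: B replaces A's keyword->positions dict comprehension (with its per-keyword any() rescan) by a flat list of (keyword-rank, product-index) match events collected in one pass over the products, then a lexicographic sort of the events and a single grouping scan that emits both output lists; no dict of lists is built.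
import Mathlib
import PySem

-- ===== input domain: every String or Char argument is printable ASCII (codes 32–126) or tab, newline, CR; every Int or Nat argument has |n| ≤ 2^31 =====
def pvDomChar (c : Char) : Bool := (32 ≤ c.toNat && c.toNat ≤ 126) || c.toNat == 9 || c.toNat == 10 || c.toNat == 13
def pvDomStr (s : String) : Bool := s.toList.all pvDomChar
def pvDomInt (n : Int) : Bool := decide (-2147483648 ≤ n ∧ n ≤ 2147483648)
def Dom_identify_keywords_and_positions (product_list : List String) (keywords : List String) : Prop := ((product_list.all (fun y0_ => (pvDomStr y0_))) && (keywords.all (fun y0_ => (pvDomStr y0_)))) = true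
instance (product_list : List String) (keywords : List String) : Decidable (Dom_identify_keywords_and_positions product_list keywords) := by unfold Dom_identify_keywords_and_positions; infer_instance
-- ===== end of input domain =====

-- B replaces A's keyword->positions dict by a flat list of (keyword-rank, product-index)
-- match events collected in one pass over the products, sorted lexicographically and then
-- emitted by a single grouping scan; same results, a different pipeline.

-- ===== PORT A =====
def identify_keywords_and_positions (product_list : List String) (keywords : List String) : List String × List Int :=
  let keyword_positions : PySem.Dict String (List Int) :=
    keywords.foldl (fun d keyword =>
      if product_list.any (fun item => PySem.Str.isIn keyword (PySem.Str.lower item)) then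
        d.insert keyword ((PySem.List.enumerate product_list).filterMap
          (fun p => if PySem.Str.isIn keyword (PySem.Str.lower p.2) then some p.1 else none))
      else d) PySem.Dict.empty
  (keyword_positions.keys, keyword_positions.values.flatten)

-- ===== PORT B =====
-- grouping step of Source B's final loop: append the keyword on a group boundary, the position always
def pvGroupStep (uniq : List String) (acc : List String × List Int) (e : Int × Int) : List String × List Int :=
  let k := PySem.List.pyGetD uniq e.1 ""
  (if acc.1.isEmpty ∨ PySem.List.pyGetD acc.1 (-1) "" ≠ k then acc.1 ++ [k] else acc.1,
   acc.2 ++ [e.2])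

def identify_keywords_and_positions_alt (product_list : List String) (keywords : List String) : List String × List Int :=
  let uniq := keywords.foldl (fun (u : List String) k => if u.contains k then u else u ++ [k]) []
  let events := (PySem.List.enumerate product_list).foldl (fun ev p =>
      let text := PySem.Str.lower p.2
      (PySem.List.enumerate uniq).foldl
        (fun ev q => if PySem.Str.isIn q.2 text then ev ++ [(q.1, p.1)] else ev) ev) []
  let sortedEvents := PySem.List.sorted2 events Prod.fst Prod.snd
  sortedEvents.foldl (pvGroupStep uniq) ([], [])

-- ===== PRECONDITION & SPEC =====
def Spec_identify_keywords_and_positions (product_list : List String) (keywords : List String) (out : List String × List Int) : Prop := out = identify_keywords_and_positions_alt product_list keywords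
instance (product_list : List String) (keywords : List String) (out : List String × List Int) : Decidable (Spec_identify_keywords_and_positions product_list keywords out) := by unfold Spec_identify_keywords_and_positions; infer_instance

-- ===== CLAIM (what is proved, stated in full; the proofs are below) =====
def Claim_equal_identify_keywords_and_positions : Prop := ∀ (product_list : List String) (keywords : List String), Dom_identify_keywords_and_positions product_list keywords → Spec_identify_keywords_and_positions product_list keywords (identify_keywords_and_positions product_list keywords)

-- ===== LEMMAS AND PROOFS =====

-- positions of keyword k in pl (A's inner comprehension), at start index s
def pvOcc (pl : List String) (k : String) (s : Int) : List Int :=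
  (PySem.List.enumerate pl s).filterMap (fun p => if PySem.Str.isIn k (PySem.Str.lower p.2) then some p.1 else none)

-- dedup of kw relative to an already-seen list
def pvDed (pl_seen : List String) (kw : List String) : List String :=
  match kw with
  | [] => []
  | k :: kw => if k ∈ pl_seen then pvDed pl_seen kw else k :: pvDed (pl_seen ++ [k]) kw

-- the items A's fold appends, given the keys already present
def pvA (pl : List String) (sn kw : List String) : List (String × List Int) :=
  match kw with
  | [] => []
  | k :: kw =>
    if (pl.any (fun item => PySem.Str.isIn k (PySem.Str.lower item))) = true ∧ k ∉ sn then
      (k, pvOcc pl k 0) :: pvA pl (sn ++ [k]) kw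
    else pvA pl sn kw

theorem pvOcc_cons (x : String) (pl : List String) (k : String) (s : Int) :
    pvOcc (x :: pl) k s =
      (if PySem.Str.isIn k (PySem.Str.lower x) then [s] else []) ++ pvOcc pl k (s + 1) := by
  simp only [pvOcc, PySem.List.enumerate_cons, List.filterMap_cons]
  split <;> simp_all

theorem pvAny_eq (pl : List String) (k : String) (s : Int) :
    (pl.any (fun item => PySem.Str.isIn k (PySem.Str.lower item))) = !(pvOcc pl k s).isEmpty := by
  induction pl generalizing s with
  | nil => simp [pvOcc]
  | cons x pl ih =>
    rw [pvOcc_cons]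
    simp only [List.any_cons]
    by_cases h : PySem.Str.isIn k (PySem.Str.lower x) = true
    · rw [if_pos h, h]
      simp
    · rw [if_neg h]
      simp only [Bool.not_eq_true] at h
      rw [h, Bool.false_or, List.nil_append, ih (s + 1)]

-- A's fold appends pvA to the items, provided every present key already stores its positions
theorem pvA_items (pl : List String) (kw : List String) (d : PySem.Dict String (List Int))
    (hnd : d.keys.Nodup) (hv : ∀ p ∈ d.items, p.2 = pvOcc pl p.1 0) :
    (kw.foldl (fun d keyword =>
      if pl.any (fun item => PySem.Str.isIn keyword (PySem.Str.lower item)) then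
        d.insert keyword ((PySem.List.enumerate pl).filterMap
          (fun p => if PySem.Str.isIn keyword (PySem.Str.lower p.2) then some p.1 else none))
      else d) d).items = d.items ++ pvA pl d.keys kw := by
  induction kw generalizing d with
  | nil => simp [pvA]
  | cons k kw ih =>
    have hocc : ((PySem.List.enumerate pl).filterMap
        (fun p => if PySem.Str.isIn k (PySem.Str.lower p.2) then some p.1 else none)) = pvOcc pl k 0 := rfl
    simp only [List.foldl_cons, pvA]
    by_cases hc : (pl.any (fun item => PySem.Str.isIn k (PySem.Str.lower item))) = true
    · rw [if_pos hc]
      by_cases hm : k ∈ d.keys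
      · -- overwrite with the same value: the dict is unchanged
        have hct : d.contains k = true := (PySem.Dict.contains_iff_mem_keys d k).2 hm
        have heq : d.insert k (pvOcc pl k 0) = d := by
          apply PySem.Dict.ext
          rw [PySem.Dict.items_insert_of_contains d _ hct]
          conv_rhs => rw [← List.map_id d.items]
          apply List.map_congr_left
          intro p hp
          by_cases hpk : p.1 = k
          · have h2 : p.2 = pvOcc pl p.1 0 := hv p hp
            have : p = (p.1, p.2) := rfl
            rw [if_pos (by simp [hpk]), this, h2, hpk, id]
          · rw [if_neg (by simp [hpk]), id]
        rw [hocc, heq, ih d hnd hv, if_neg (by simp [hm])]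
      · have hct : d.contains k = false := by
          by_contra h
          exact hm ((PySem.Dict.contains_iff_mem_keys d k).1 (by simpa using h))
        rw [hocc]
        have hnd' : (d.insert k (pvOcc pl k 0)).keys.Nodup := by
          rw [PySem.Dict.keys_insert_of_not_contains d _ hct]
          refine List.Nodup.append hnd (List.nodup_singleton k) ?_
          intro a ha hb
          simp only [List.mem_singleton] at hb
          exact hm (hb ▸ ha)
        have hv' : ∀ p ∈ (d.insert k (pvOcc pl k 0)).items, p.2 = pvOcc pl p.1 0 := by
          intro p hp
          rcases (PySem.Dict.mem_items_insert d _ _ _).1 hp with h | ⟨h, _⟩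
          · subst h; rfl
          · exact hv p h
        rw [ih _ hnd' hv']
        rw [PySem.Dict.items_insert_of_not_contains d _ hct,
            PySem.Dict.keys_insert_of_not_contains d _ hct,
            if_pos ⟨hc, hm⟩]
        simp
    · rw [if_neg hc, ih d hnd hv, if_neg (fun hh => hc hh.1)]

-- pvA only reads the seen list through membership of keywords satisfying the any-condition
theorem pvA_congr (pl : List String) (kw : List String) (sn sn' : List String)
    (h : ∀ x, (pl.any (fun item => PySem.Str.isIn x (PySem.Str.lower item))) = true → (x ∈ sn ↔ x ∈ sn')) :
    pvA pl sn kw = pvA pl sn' kw := by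
  induction kw generalizing sn sn' with
  | nil => rfl
  | cons k kw ih =>
    simp only [pvA]
    by_cases hc : (pl.any (fun item => PySem.Str.isIn k (PySem.Str.lower item))) = true
    · by_cases hm : k ∈ sn
      · have hm' : k ∈ sn' := (h k hc).1 hm
        rw [if_neg (fun hh => hh.2 hm), if_neg (fun hh => hh.2 hm')]
        exact ih sn sn' h
      · have hm' : k ∉ sn' := fun hx => hm ((h k hc).2 hx)
        rw [if_pos ⟨hc, hm⟩, if_pos ⟨hc, hm'⟩]
        rw [ih (sn ++ [k]) (sn' ++ [k]) (by intro x hx; simp [h x hx])]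
    · rw [if_neg (fun hh => hc hh.1), if_neg (fun hh => hc hh.1)]
      exact ih sn sn' h

theorem pvA_eq_ded (pl : List String) (kw : List String) (sn : List String) :
    pvA pl sn kw = ((pvDed sn kw).filter
        (fun k => pl.any (fun item => PySem.Str.isIn k (PySem.Str.lower item)))).map
      (fun k => (k, pvOcc pl k 0)) := by
  induction kw generalizing sn with
  | nil => simp [pvA, pvDed]
  | cons k kw ih =>
    simp only [pvA, pvDed]
    by_cases hm : k ∈ sn
    · rw [if_neg (fun hh => hh.2 hm), if_pos hm]
      exact ih sn
    · rw [if_neg hm]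
      by_cases hc : (pl.any (fun item => PySem.Str.isIn k (PySem.Str.lower item))) = true
      · rw [if_pos ⟨hc, hm⟩, List.filter_cons, if_pos hc, List.map_cons, ih (sn ++ [k])]
      · rw [if_neg (fun hh => hc hh.1), List.filter_cons, if_neg hc]
        rw [pvA_congr pl kw sn (sn ++ [k]) (by
          intro x hx
          constructor
          · intro h; simp [h]
          · intro h
            rcases List.mem_append.1 h with h | h
            · exact h
            · simp only [List.mem_singleton] at h; subst h; exact absurd hx hc)]
        rw [ih (sn ++ [k])]

theorem pvDed_update (kw : List String) (sn : List String) :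
    PySem.Set.update sn kw = sn ++ pvDed sn kw := by
  induction kw generalizing sn with
  | nil => simp [pvDed, PySem.Set.update_nil]
  | cons k kw ih =>
    rw [PySem.Set.update_cons, PySem.Set.add_eq_ite]
    simp only [pvDed]
    by_cases hm : k ∈ sn
    · rw [if_pos hm, if_pos hm, ih sn]
    · rw [if_neg hm, if_neg hm, ih (sn ++ [k])]
      simp

theorem pvDedup_eq (kw : List String) : PySem.List.dedup kw = pvDed [] kw := by
  rw [PySem.List.dedup_eq_ofList, ← PySem.Set.update_nil_left, pvDed_update]
  simp

-- B-side: the hand-written uniq loop is the ordered dedup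
theorem pvUniq (kw : List String) :
    kw.foldl (fun (u : List String) k => if u.contains k then u else u ++ [k]) [] = PySem.List.dedup kw := by
  rw [PySem.List.dedup_eq_ofList, PySem.Set.ofList_eq_foldl]
  refine PySem.List.foldl_congr_mem _ _ _ _ ?_
  intro acc x _
  rw [PySem.Set.add_eq_ite]
  by_cases h : x ∈ acc
  · simp [h]
  · simp [h]

-- events of one keyword block: filterMap-then-pair equals filter-then-map
theorem pvMapFilterMap {γ : Type} (L : List (Int × γ)) (c : Int × γ → Bool) (i : Int) :
    (L.filterMap (fun p => if c p then some p.1 else none)).map (fun j => (i, j))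
      = (L.filter c).map (fun p => (i, p.1)) := by
  induction L with
  | nil => simp
  | cons x L ih =>
    simp only [List.filterMap_cons, List.filter_cons]
    by_cases h : c x = true <;> simp [h, ih]

theorem pvFlatMapAppendPerm {β γ : Type} (M : List β) (C D : β → List γ) :
    (M.flatMap (fun b => C b ++ D b)).Perm (M.flatMap C ++ M.flatMap D) := by
  induction M with
  | nil => simp
  | cons m M ih =>
    simp only [List.flatMap_cons]
    refine (List.Perm.append_left (C m ++ D m) ih).trans ?_
    rw [List.append_assoc, List.append_assoc]
    exact List.Perm.append_left (C m) (List.perm_append_comm_assoc (D m) (M.flatMap C) (M.flatMap D))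

theorem pvFlatMapIf {α β γ : Type} (M : List β) (a : α) (p : β → α → Bool) (f : β → α → γ) :
    M.flatMap (fun b => if p b a then [f b a] else [])
      = (M.filter (fun b => p b a)).map (fun b => f b a) := by
  induction M with
  | nil => simp
  | cons m M ihm =>
    simp only [List.flatMap_cons, List.filter_cons]
    by_cases h : p m a = true <;> simp [h, ihm]

-- interchange of the two nested scans, as a permutation of the event list
theorem pvExchange {α β γ : Type} (L : List α) (M : List β) (p : β → α → Bool) (f : β → α → γ) :
    (L.flatMap (fun a => (M.filter (fun b => p b a)).map (fun b => f b a))).Perm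
      (M.flatMap (fun b => (L.filter (fun a => p b a)).map (fun a => f b a))) := by
  induction L with
  | nil => simp
  | cons a L ih =>
    have h2 := pvFlatMapIf M a p f
    have h3 : (M.flatMap (fun b => ((a :: L).filter (fun a => p b a)).map (fun a => f b a)))
        = M.flatMap (fun b => (if p b a then [f b a] else [])
            ++ (L.filter (fun a => p b a)).map (fun a => f b a)) := by
      congr 1
      funext b
      rw [List.filter_cons]
      by_cases h : p b a = true <;> simp [h]
    rw [List.flatMap_cons, h3]
    refine List.Perm.trans ?_ (pvFlatMapAppendPerm M _ _).symm
    rw [h2]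
    exact List.Perm.append_left _ ih

theorem pvOcc_pairwise (pl : List String) (k : String) (s : Int) :
    (pvOcc pl k s).Pairwise (· < ·) := by
  unfold pvOcc
  refine List.pairwise_filterMap.2 ?_
  refine (PySem.List.pairwise_lt_enumerate pl s).imp ?_
  intro a b h x hx y hy
  split at hx
  · split at hy
    · cases hx; cases hy; exact h
    · cases hy
  · cases hx

-- the sorted event list, named: blocks in keyword-rank order, positions inside each block
theorem pvT_pairwise (pl : List String) (uniq : List String) :
    ((PySem.List.enumerate uniq).flatMap (fun q => (pvOcc pl q.2 0).map (fun j => (q.1, j)))).Pairwise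
      (fun a b => (toLex a : Lex (Int × Int)) < toLex b) := by
  rw [List.flatMap_def]
  refine List.pairwise_flatten.2 ⟨?_, ?_⟩
  · intro l hl
    rcases List.mem_map.1 hl with ⟨q, _, rfl⟩
    refine List.pairwise_map.2 ?_
    refine (pvOcc_pairwise pl q.2 0).imp ?_
    intro a b h
    rw [Prod.Lex.lt_iff]
    exact Or.inr ⟨rfl, h⟩
  · refine List.pairwise_map.2 ?_
    refine (PySem.List.pairwise_lt_enumerate uniq 0).imp ?_
    intro q1 q2 h x hx y hy
    rcases List.mem_map.1 hx with ⟨a, _, rfl⟩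
    rcases List.mem_map.1 hy with ⟨b, _, rfl⟩
    rw [Prod.Lex.lt_iff]
    exact Or.inl h

-- Python's tuple sort is the sort by the lexicographic key
theorem pvSorted2_eq_sorted (xs : List (Int × Int)) :
    PySem.List.sorted2 xs Prod.fst Prod.snd
      = PySem.List.sorted xs (fun p => (toLex p : Lex (Int × Int))) := by
  have hb : (fun (a b : Int × Int) => decide (a.1 < b.1) || (!decide (b.1 < a.1) && decide (a.2 < b.2)))
      = (fun (a b : Int × Int) => decide ((toLex a : Lex (Int × Int)) < toLex b)) := by
    funext a b
    rcases lt_trichotomy a.1 b.1 with h | h | h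
    · simp [Prod.Lex.lt_iff, h]
    · simp [Prod.Lex.lt_iff, h]
    · simp [Prod.Lex.lt_iff, asymm h, ne_of_gt h]
      omega
  show xs.foldl (fun acc x => PySem.List.insertBy
      (fun a b => decide (a.1 < b.1) || (!decide (b.1 < a.1) && decide (a.2 < b.2))) x acc) []
    = xs.foldl (fun acc x => PySem.List.insertBy
      (fun a b => decide ((toLex a : Lex (Int × Int)) < toLex b)) x acc) []
  rw [hb]

theorem pvStep_same (u : List String) (s : List String) (k : String) (fp : List Int) (i j : Int)
    (hk : PySem.List.pyGetD u i "" = k) :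
    pvGroupStep u (s ++ [k], fp) (i, j) = (s ++ [k], fp ++ [j]) := by
  simp [pvGroupStep, hk]

theorem pvRun_same (u : List String) (i : Int) (k : String) (hk : PySem.List.pyGetD u i "" = k)
    (js : List Int) : ∀ (s : List String) (fp : List Int),
    ((js.map (fun j => (i, j))).foldl (pvGroupStep u) (s ++ [k], fp)) = (s ++ [k], fp ++ js) := by
  induction js with
  | nil => intro s fp; simp
  | cons j js ih =>
    intro s fp
    rw [List.map_cons, List.foldl_cons, pvStep_same u s k fp i j hk, ih s (fp ++ [j])]
    simp

-- one nonempty keyword block appends its keyword once and all its positions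
theorem pvBlock (u : List String) (i : Int) (k : String) (hk : PySem.List.pyGetD u i "" = k)
    (js : List Int) (hne : js ≠ []) (fk : List String) (fp : List Int)
    (hfk : fk = [] ∨ ∃ s y, fk = s ++ [y] ∧ y ≠ k) :
    ((js.map (fun j => (i, j))).foldl (pvGroupStep u) (fk, fp)) = (fk ++ [k], fp ++ js) := by
  cases js with
  | nil => exact absurd rfl hne
  | cons j js =>
    have h1 : pvGroupStep u (fk, fp) (i, j) = (fk ++ [k], fp ++ [j]) := by
      rcases hfk with h | ⟨s, y, h1, hy⟩
      · subst h; simp [pvGroupStep, hk]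
      · subst h1; simp [pvGroupStep, hk, hy]
    rw [List.map_cons, List.foldl_cons, h1, pvRun_same u i k hk js fk (fp ++ [j])]
    simp

-- the grouping scan over the sorted event list, block by block
theorem pvBlocks (u : List String) (pl : List String) :
    ∀ (bs : List (Int × String)) (fk : List String) (fp : List Int),
    (∀ q ∈ bs, PySem.List.pyGetD u q.1 "" = q.2) →
    ((bs.map (fun q => q.2)).Nodup) →
    (fk = [] ∨ ∃ s y, fk = s ++ [y] ∧ y ∉ bs.map (fun q => q.2)) →
    ((bs.flatMap (fun q => (pvOcc pl q.2 0).map (fun j => (q.1, j)))).foldl (pvGroupStep u) (fk, fp))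
      = (fk ++ (bs.filter (fun q => !(pvOcc pl q.2 0).isEmpty)).map (fun q => q.2),
         fp ++ ((bs.filter (fun q => !(pvOcc pl q.2 0).isEmpty)).map (fun q => pvOcc pl q.2 0)).flatten) := by
  intro bs
  induction bs with
  | nil => intro fk fp _ _ _; simp
  | cons q bs ih =>
    intro fk fp hlk hnd hinv
    have hlkq : PySem.List.pyGetD u q.1 "" = q.2 := hlk q (List.mem_cons_self)
    have hnd2 : ((q.2 :: bs.map (fun q => q.2))).Nodup := by simpa using hnd
    have hnd' : (bs.map (fun q => q.2)).Nodup := (List.nodup_cons.1 hnd2).2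
    have hq2 : q.2 ∉ bs.map (fun q => q.2) := (List.nodup_cons.1 hnd2).1
    rw [List.flatMap_cons, List.foldl_append]
    by_cases hocc : (pvOcc pl q.2 0).isEmpty
    · have he : pvOcc pl q.2 0 = [] := by simpa [List.isEmpty_iff] using hocc
      rw [he]
      simp only [List.map_nil, List.foldl_nil, List.filter_cons]
      rw [if_neg (by simp [he])]
      refine ih fk fp (fun r hr => hlk r (List.mem_cons_of_mem q hr)) hnd' ?_
      refine hinv.imp id ?_
      rintro ⟨s, y, h1, h2⟩
      exact ⟨s, y, h1, fun hy => h2 (by rw [List.map_cons]; exact List.mem_cons_of_mem _ hy)⟩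
    · have hne : pvOcc pl q.2 0 ≠ [] := by
        intro h
        rw [h] at hocc
        simp at hocc
      have hfk' : fk = [] ∨ ∃ s y, fk = s ++ [y] ∧ y ≠ q.2 := by
        refine hinv.imp id ?_
        rintro ⟨s, y, h1, h2⟩
        refine ⟨s, y, h1, fun he => h2 ?_⟩
        rw [List.map_cons, he]
        exact List.mem_cons_self
      rw [pvBlock u q.1 q.2 hlkq (pvOcc pl q.2 0) hne fk fp hfk']
      rw [ih (fk ++ [q.2]) (fp ++ pvOcc pl q.2 0)
        (fun r hr => hlk r (List.mem_cons_of_mem q hr)) hnd' (Or.inr ⟨fk, q.2, rfl, hq2⟩)]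
      simp only [List.filter_cons]
      rw [if_pos (by simpa using hocc)]
      simp [List.append_assoc]

-- a filter/map over enumerate that only reads the element is a filter/map over the list
theorem pvEnumFilter {α β : Type} (xs : List α) (s : Int) (p : α → Bool) (f : α → β) :
    (((PySem.List.enumerate xs s).filter (fun q => p q.2)).map (fun q => f q.2)) = (xs.filter p).map f := by
  induction xs generalizing s with
  | nil => simp [PySem.List.enumerate_nil]
  | cons x xs ih =>
    simp only [PySem.List.enumerate_cons, List.filter_cons]
    by_cases h : p x = true <;> simp [h, ih]

-- ===== VERDICT (by name: the statement is the Claim_ definition above) =====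
theorem identify_keywords_and_positions_spec : Claim_equal_identify_keywords_and_positions := by
  intro pl kw _
  unfold Spec_identify_keywords_and_positions
  simp only [identify_keywords_and_positions, identify_keywords_and_positions_alt]
  -- A side: the dict's items are the qualifying deduped keywords with their positions
  have hA := pvA_items pl kw PySem.Dict.empty PySem.Dict.nodup_keys_empty
    (by intro p hp; cases hp)
  rw [show (PySem.Dict.empty : PySem.Dict String (List Int)).keys = [] from rfl] at hA
  rw [pvA_eq_ded, ← pvDedup_eq kw] at hA
  rw [show (PySem.Dict.empty : PySem.Dict String (List Int)).items = [] from rfl, List.nil_append] at hA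
  -- B side
  rw [pvUniq kw]
  have hndu : (PySem.List.dedup kw).Nodup := by
    rw [PySem.List.dedup_eq_ofList]; exact PySem.Set.nodup_ofList kw
  have hev : ((PySem.List.enumerate pl).foldl (fun ev p =>
      (PySem.List.enumerate (PySem.List.dedup kw)).foldl
        (fun ev q => if PySem.Str.isIn q.2 (PySem.Str.lower p.2) then ev ++ [(q.1, p.1)] else ev) ev)
      ([] : List (Int × Int)))
      = (PySem.List.enumerate pl).flatMap (fun p =>
          ((PySem.List.enumerate (PySem.List.dedup kw)).filter
            (fun q => PySem.Str.isIn q.2 (PySem.Str.lower p.2))).map (fun q => (q.1, p.1))) := by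
    refine Eq.trans (PySem.List.foldl_congr_mem _ _
      (fun ev p => ev ++ ((PySem.List.enumerate (PySem.List.dedup kw)).filter
        (fun q => PySem.Str.isIn q.2 (PySem.Str.lower p.2))).map (fun q => (q.1, p.1))) _ ?_) ?_
    · intro acc x _
      exact PySem.List.foldl_append_if _ _ _ _
    · rw [PySem.List.foldl_append_eq_flatMap, List.nil_append]
  rw [hev]
  have hsort : PySem.List.sorted2
      ((PySem.List.enumerate pl).flatMap (fun p =>
          ((PySem.List.enumerate (PySem.List.dedup kw)).filter
            (fun q => PySem.Str.isIn q.2 (PySem.Str.lower p.2))).map (fun q => (q.1, p.1))))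
      Prod.fst Prod.snd
      = (PySem.List.enumerate (PySem.List.dedup kw)).flatMap
          (fun q => (pvOcc pl q.2 0).map (fun j => (q.1, j))) := by
    rw [pvSorted2_eq_sorted]
    refine PySem.List.sorted_eq_of_perm_of_pairwise_lt _ _ _ ?_ (pvT_pairwise pl (PySem.List.dedup kw))
    have hTeq : (PySem.List.enumerate (PySem.List.dedup kw)).flatMap
          (fun q => (pvOcc pl q.2 0).map (fun j => (q.1, j)))
        = (PySem.List.enumerate (PySem.List.dedup kw)).flatMap
          (fun q => ((PySem.List.enumerate pl).filter
            (fun p => PySem.Str.isIn q.2 (PySem.Str.lower p.2))).map (fun p => (q.1, p.1))) := by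
      congr 1
      funext q
      simp only [pvOcc]
      exact pvMapFilterMap _ _ _
    rw [hTeq]
    exact (pvExchange (PySem.List.enumerate pl) (PySem.List.enumerate (PySem.List.dedup kw))
      (fun q p => PySem.Str.isIn q.2 (PySem.Str.lower p.2)) (fun q p => (q.1, p.1))).symm
  rw [hsort]
  have hlk : ∀ q ∈ PySem.List.enumerate (PySem.List.dedup kw),
      PySem.List.pyGetD (PySem.List.dedup kw) q.1 "" = q.2 := by
    intro q hq
    rcases (PySem.List.mem_enumerate_iff _ _ _).1 hq with ⟨n, hn, rfl⟩
    simp only [zero_add]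
    rw [PySem.List.pyGetD_natCast]
    exact List.getD_eq_getElem _ _ hn
  have hnd : ((PySem.List.enumerate (PySem.List.dedup kw)).map (fun q => q.2)).Nodup := by
    rw [PySem.List.map_snd_enumerate]
    exact hndu
  rw [pvBlocks (PySem.List.dedup kw) pl (PySem.List.enumerate (PySem.List.dedup kw)) [] []
    hlk hnd (Or.inl rfl)]
  -- both sides are now the filtered keyword list and its concatenated positions
  have hfc : (PySem.List.dedup kw).filter (fun k => !(pvOcc pl k 0).isEmpty)
      = (PySem.List.dedup kw).filter (fun k => pl.any (fun item => PySem.Str.isIn k (PySem.Str.lower item))) := by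
    refine List.filter_congr ?_
    intro k _
    exact (pvAny_eq pl k 0).symm
  have hk1 : ((PySem.List.enumerate (PySem.List.dedup kw)).filter
        (fun q => !(pvOcc pl q.2 0).isEmpty)).map (fun q => q.2)
      = (PySem.List.dedup kw).filter (fun k => !(pvOcc pl k 0).isEmpty) := by
    rw [pvEnumFilter (PySem.List.dedup kw) 0 (fun k => !(pvOcc pl k 0).isEmpty) (fun k => k)]
    simp
  have hk2 : ((PySem.List.enumerate (PySem.List.dedup kw)).filter
        (fun q => !(pvOcc pl q.2 0).isEmpty)).map (fun q => pvOcc pl q.2 0)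
      = ((PySem.List.dedup kw).filter (fun k => !(pvOcc pl k 0).isEmpty)).map (fun k => pvOcc pl k 0) := by
    exact pvEnumFilter (PySem.List.dedup kw) 0 (fun k => !(pvOcc pl k 0).isEmpty) (fun k => pvOcc pl k 0)
  simp only [PySem.Dict.keys, PySem.Dict.values, hA, List.map_map, hk1, hk2, hfc, List.nil_append]
  refine Prod.ext ?_ ?_
  · show ((PySem.List.dedup kw).filter _).map ((fun x : String × List Int => x.1) ∘ (fun k => (k, pvOcc pl k 0))) = _
    rw [show ((fun x : String × List Int => x.1) ∘ (fun k => (k, pvOcc pl k 0))) = id from rfl, List.map_id]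
  · show (((PySem.List.dedup kw).filter _).map ((fun x : String × List Int => x.2) ∘ (fun k => (k, pvOcc pl k 0)))).flatten = _
    rw [show ((fun x : String × List Int => x.2) ∘ (fun k => (k, pvOcc pl k 0))) = (fun k => pvOcc pl k 0) from rfl]
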